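-- pv_equiv track=rewrite | github.com/dsgsdgjiosdjoifds/functions | 7-19.py | f
-- ===== SOURCE A (Python) =====
-- def f(number):
--     _sum = 0
--     digit_count = {}
--     for ch in str(number):
--         count = digit_count.get(ch, 0)
--         digit = int(ch)
--         if count == 1:
--             _sum += digit * 2 # we multiply by 2 to also add the previous number that wasnt yet summed because it appeared first time
--         elif count > 1:
--             _sum += digit
--         digit_count[ch] = count + 1
--     return _sum
-- ===== SOURCE B (Python) =====
-- def f(number):
--     counts = {}
--     for ch in str(number):
--         counts[ch] = counts.get(ch, 0) + 1
--     total = 0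
--     for ch, c in counts.items():
--         digit = int(ch)
--         if c >= 2:
--             total += digit * c
--     return total
-- ===== Notes on version B (the rewrite author's own statement) =====
-- stated objective: alternative
-- what changed: Replaces A's single-pass doubling trick (add 2*d on the second occurrence, d afterwards, tracked inline in the dict) by an aggregate-then-summarize decomposition: build a frequency table in one pass, then sum digit*count over distinct digits whose count is at least 2.
-- outside the precondition, e.g. on f(-11): A raises ValueError, B raises ValueError
import Mathlib
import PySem

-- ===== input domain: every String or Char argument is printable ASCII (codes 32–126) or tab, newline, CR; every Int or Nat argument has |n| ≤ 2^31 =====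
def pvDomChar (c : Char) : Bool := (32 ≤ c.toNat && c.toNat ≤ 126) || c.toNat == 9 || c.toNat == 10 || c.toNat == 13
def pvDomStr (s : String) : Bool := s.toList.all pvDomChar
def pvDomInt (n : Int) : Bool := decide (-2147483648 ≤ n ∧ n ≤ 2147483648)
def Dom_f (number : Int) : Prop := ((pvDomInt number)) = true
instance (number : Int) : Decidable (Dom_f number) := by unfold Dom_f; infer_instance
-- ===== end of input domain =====

-- B replaces A's inline second-occurrence-doubling trick by a frequency-table pass followed by a
-- summarize pass over the distinct digits (alternative decomposition, same cost).


-- int(ch) for a single character; Python raises ValueError on a non-digit, which Pre_f excludes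
-- (inside Pre_f every character of str(number) is a digit, where this is exact).
def pvDig (c : Char) : Int := (PySem.Int.ofChars? [c]).getD 0

-- ===== PORT A =====
def fStepA (st : Int × PySem.Dict Char Int) (ch : Char) : Int × PySem.Dict Char Int :=
  let count := st.2.getD ch 0
  let digit := pvDig ch
  let sum := if count = 1 then st.1 + digit * 2 else if count > 1 then st.1 + digit else st.1
  (sum, st.2.insert ch (count + 1))

def f (number : Int) : Int :=
  ((PySem.Int.toStr number).toList.foldl fStepA (0, PySem.Dict.empty)).1

-- ===== PORT B =====
def f_alt (number : Int) : Int :=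
  let counts := (PySem.Int.toStr number).toList.foldl
      (fun d ch => d.insert ch (d.getD ch 0 + 1)) PySem.Dict.empty
  counts.items.foldl
      (fun total p => let digit := pvDig p.1; if p.2 ≥ 2 then total + digit * p.2 else total) 0

-- ===== PRECONDITION & SPEC =====
-- Pre_f excludes negative numbers: there str(number) starts with '-' and A's int(ch) raises ValueError
-- (B raises the same way); A returns normally exactly on 0 ≤ number.
def Pre_f (number : Int) : Prop := 0 ≤ number
instance (number : Int) : Decidable (Pre_f number) := by unfold Pre_f; infer_instance
def pvWitness_f : Int := (1223334444)

def Spec_f (number : Int) (out : Int) : Prop := out = f_alt number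
instance (number : Int) (out : Int) : Decidable (Spec_f number out) := by unfold Spec_f; infer_instance

-- ===== CLAIM (what is proved, stated in full; the proofs are below) =====
def Claim_equal_f : Prop := ∀ (number : Int), Dom_f number → Pre_f number → Spec_f number (f number)

-- ===== LEMMAS AND PROOFS =====

-- contribution of one distinct character with its final count
def pvContrib (p : Char × Int) : Int := if p.2 ≥ 2 then pvDig p.1 * p.2 else 0

lemma foldl_contrib (l : List (Char × Int)) (t : Int) :
    l.foldl (fun total p => let digit := pvDig p.1; if p.2 ≥ 2 then total + digit * p.2 else total) t
      = t + (l.map pvContrib).sum := by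
  induction l generalizing t with
  | nil => simp
  | cons p l ih =>
      simp only [List.foldl_cons, List.map_cons, List.sum_cons, ih, pvContrib]
      split_ifs <;> ring

-- sum over a nodup list where the two functions differ only at one member
lemma sum_map_update (l : List Char) (ch : Char) (F G : Char → Int)
    (hn : l.Nodup) (hm : ch ∈ l) (h : ∀ k ∈ l, k ≠ ch → F k = G k) :
    (l.map F).sum = (l.map G).sum + F ch - G ch := by
  induction l with
  | nil => simp at hm
  | cons k t ih =>
      rcases List.nodup_cons.mp hn with ⟨hk, hnt⟩
      by_cases hkc : k = ch
      · subst hkc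
        have : ∀ x ∈ t, F x = G x := fun x hx =>
          h x (List.mem_cons_of_mem _ hx) (fun hne => hk (hne ▸ hx))
        have hmap : t.map F = t.map G := List.map_congr_left this
        simp [hmap]; ring
      · have hm' : ch ∈ t := by
          rcases List.mem_cons.mp hm with h1 | h1
          · exact absurd h1.symm hkc
          · exact h1
        have := ih hnt hm' (fun x hx => h x (List.mem_cons_of_mem _ hx))
        simp [this, h k (List.mem_cons_self) hkc]; ring

-- A's second accumulator is exactly B's counting fold
lemma snd_foldl_fStepA (l : List Char) (s : Int) (d : PySem.Dict Char Int) :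
    (l.foldl fStepA (s, d)).2 = l.foldl (fun d ch => d.insert ch (d.getD ch 0 + 1)) d := by
  induction l generalizing s d with
  | nil => rfl
  | cons ch l ih => simp only [List.foldl_cons, fStepA]; exact ih _ _

-- the distinct-character/count characterisation of A's running sum
lemma fst_foldl_fStepA (cs : List Char) :
    (cs.foldl fStepA (0, PySem.Dict.empty)).1
      = ((PySem.Set.ofList cs).map (fun k => pvContrib (k, (cs.count k : Int)))).sum := by
  induction cs using List.reverseRecOn with
  | nil => simp [PySem.Set.ofList]
  | append_singleton cs ch ih =>
      rw [List.foldl_append, List.foldl_cons, List.foldl_nil]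
      have hcnt : (cs.foldl fStepA (0, PySem.Dict.empty)).2 = PySem.Dict.counter cs := by
        rw [snd_foldl_fStepA, PySem.Dict.foldl_insert_getD_add_one_eq_counter]
      have hget : ((cs.foldl fStepA (0, PySem.Dict.empty)).2).getD ch 0 = (cs.count ch : Int) := by
        rw [hcnt, PySem.Dict.getD_counter]
      have hch : ((cs ++ [ch]).count ch : Int) = (cs.count ch : Int) + 1 := by
        rw [List.count_append]; push_cast; simp
      have hne : ∀ k : Char, k ≠ ch → ((cs ++ [ch]).count k : Int) = (cs.count k : Int) := by
        intro k hk
        rw [List.count_append]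
        have : List.count k [ch] = 0 := by
          simp [Ne.symm hk]
        rw [this]; push_cast; ring
      show (if ((cs.foldl fStepA (0, PySem.Dict.empty)).2).getD ch 0 = 1
              then (cs.foldl fStepA (0, PySem.Dict.empty)).1 + pvDig ch * 2
              else if ((cs.foldl fStepA (0, PySem.Dict.empty)).2).getD ch 0 > 1
                then (cs.foldl fStepA (0, PySem.Dict.empty)).1 + pvDig ch
                else (cs.foldl fStepA (0, PySem.Dict.empty)).1) = _
      rw [hget, ih]
      by_cases hmem : ch ∈ cs
      · have hset : PySem.Set.ofList (cs ++ [ch]) = PySem.Set.ofList cs := by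
          rw [PySem.Set.ofList_append_singleton,
            PySem.Set.add_of_mem ((PySem.Set.mem_ofList _ _).mpr hmem)]
        have hupd := sum_map_update (PySem.Set.ofList cs) ch
            (fun k => pvContrib (k, ((cs ++ [ch]).count k : Int)))
            (fun k => pvContrib (k, (cs.count k : Int)))
            (PySem.Set.nodup_ofList cs) ((PySem.Set.mem_ofList _ _).mpr hmem)
            (by intro k _ hkc; simp only [hne k hkc])
        rw [hset, hupd]
        simp only [hch]
        have hpos : 0 < cs.count ch := List.count_pos_iff.mpr hmem
        rcases Nat.lt_or_ge (cs.count ch) 2 with h2 | h2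
        · have h1 : cs.count ch = 1 := by omega
          rw [h1]
          norm_num [pvContrib]
        · have h2' : (2 : Int) ≤ (cs.count ch : Int) := by exact_mod_cast h2
          rw [if_neg (by omega), if_pos (by omega)]
          simp only [pvContrib]
          rw [if_pos (by omega), if_pos (by omega)]
          ring
      · have hzero : (cs.count ch : Int) = 0 := by
          exact_mod_cast List.count_eq_zero.mpr hmem
        have hset : PySem.Set.ofList (cs ++ [ch]) = PySem.Set.ofList cs ++ [ch] := by
          rw [PySem.Set.ofList_append_singleton,
            PySem.Set.add_of_not_mem (fun h => hmem ((PySem.Set.mem_ofList _ _).mp h))]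
        have hmap : (PySem.Set.ofList cs).map (fun k => pvContrib (k, ((cs ++ [ch]).count k : Int)))
            = (PySem.Set.ofList cs).map (fun k => pvContrib (k, (cs.count k : Int))) := by
          apply List.map_congr_left
          intro k hk
          have hkc : k ≠ ch := fun h => hmem (h ▸ (PySem.Set.mem_ofList _ _).mp hk)
          rw [hne k hkc]
        rw [hset, List.map_append, List.sum_append, hmap]
        rw [if_neg (by omega), if_neg (by omega)]
        simp [hzero, pvContrib]

-- ===== VERDICT (by name: the statement is the Claim_ definition above) =====
theorem f_spec : Claim_equal_f := by
  intro number _ _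
  unfold Spec_f f f_alt
  rw [fst_foldl_fStepA, PySem.Dict.foldl_insert_getD_add_one_eq_counter, foldl_contrib,
    PySem.Dict.items_counter, List.map_map]
  simp only [Function.comp_def]
  ring
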